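-- pv_equiv track=rewrite | github.com/JeriH26/Python_JAVA_Business_Simulation | training/python/basic_syntax_practice/python_basics_extra_todo.py | count_inclusive
-- ===== SOURCE A (Python) =====
-- def count_inclusive(nums, left, right):
--     count = 0
--     if left > right:
--         return 0
--
--     i = left
--     while i <= right and i < len(nums):
--         count += 1
--         i += 1
--     return count
-- ===== SOURCE B (Python) =====
-- def count_inclusive(nums, left, right):
--     if left > right:
--         return 0
--     return max(0, min(right, len(nums) - 1) - left + 1)
-- ===== Notes on version B (the rewrite author's own statement) =====
-- stated objective: simpler
-- what changed: Replaced the element-by-element counting loop with a closed-form clamp max(0, min(right, len-1) - left + 1).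
import Mathlib
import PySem

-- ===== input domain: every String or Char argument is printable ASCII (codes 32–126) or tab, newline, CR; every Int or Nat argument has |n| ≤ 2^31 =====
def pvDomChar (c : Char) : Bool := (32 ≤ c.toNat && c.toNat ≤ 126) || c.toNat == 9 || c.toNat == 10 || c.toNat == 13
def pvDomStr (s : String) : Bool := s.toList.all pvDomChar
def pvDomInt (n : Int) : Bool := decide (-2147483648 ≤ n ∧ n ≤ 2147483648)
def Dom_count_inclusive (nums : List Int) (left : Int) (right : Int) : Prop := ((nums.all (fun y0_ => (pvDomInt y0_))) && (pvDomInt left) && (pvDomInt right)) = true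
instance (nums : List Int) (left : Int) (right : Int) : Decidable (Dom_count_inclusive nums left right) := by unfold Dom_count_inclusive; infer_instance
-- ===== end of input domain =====

-- B replaces A's element-by-element counting loop with the closed-form clamp
-- max(0, min(right, len-1) - left + 1); same return value on every input (A is total).

-- ===== PORT A =====
-- while loop of A: count while i <= right and i < len(nums)
def countLoopA (n : Int) (right : Int) (i : Int) (count : Int) : Int :=
  if i ≤ right ∧ i < n then countLoopA n right (i + 1) (count + 1) else count
termination_by (right + 1 - i).toNat
decreasing_by omega

def count_inclusive (nums : List Int) (left : Int) (right : Int) : Int :=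
  if left > right then 0
  else countLoopA (nums.length : Int) right left 0

-- ===== PORT B =====
def count_inclusive_alt (nums : List Int) (left : Int) (right : Int) : Int :=
  if left > right then 0
  else max 0 (min right ((nums.length : Int) - 1) - left + 1)

-- ===== PRECONDITION & SPEC =====
def Spec_count_inclusive (nums : List Int) (left : Int) (right : Int) (out : Int) : Prop := out = count_inclusive_alt nums left right
instance (nums : List Int) (left : Int) (right : Int) (out : Int) : Decidable (Spec_count_inclusive nums left right out) := by unfold Spec_count_inclusive; infer_instance

-- ===== CLAIM (what is proved, stated in full; the proofs are below) =====
def Claim_equal_count_inclusive : Prop := ∀ (nums : List Int) (left : Int) (right : Int), Dom_count_inclusive nums left right → Spec_count_inclusive nums left right (count_inclusive nums left right)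

-- ===== LEMMAS AND PROOFS =====

theorem countLoopA_eq (n right i count : Int) :
    countLoopA n right i count = count + max 0 (min (right + 1) n - i) := by
  unfold countLoopA
  split
  · rw [countLoopA_eq]; omega
  · omega
termination_by (right + 1 - i).toNat
decreasing_by omega

-- ===== VERDICT (by name: the statement is the Claim_ definition above) =====
theorem count_inclusive_spec : Claim_equal_count_inclusive := by
  intro nums left right _
  unfold Spec_count_inclusive count_inclusive count_inclusive_alt
  split
  · rfl
  · rw [countLoopA_eq]; omega
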